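-- pv_equiv track=rewrite | github.com/BrettRey/erdos-problem-993 | conjecture_a_private_neighbor_scan.py | decode_flags
-- ===== SOURCE A (Python) =====
-- def decode_flags(mask: int, h_nodes: list[int], flags: list[bool] | None) -> dict[int, bool]:
--     if flags is None:
--         return {}
--     out: dict[int, bool] = {}
--     rem = mask
--     while rem:
--         lsb = rem & -rem
--         i = lsb.bit_length() - 1
--         rem ^= lsb
--         out[h_nodes[i]] = flags[i]
--     return out
-- ===== SOURCE B (Python) =====
-- def decode_flags(mask: int, h_nodes: list[int], flags: list[bool] | None) -> dict[int, bool]: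
--     if flags is None:
--         return {}
--     return {h_nodes[i]: flags[i]
--             for i, c in enumerate(reversed(bin(mask)[2:]))
--             if c == '1'}
-- ===== Notes on version B (the rewrite author's own statement) =====
-- stated objective: alternative
-- what changed: B abandons bitwise arithmetic entirely: it renders the mask as its binary string via bin(), reverses the digit string so positions line up with bit indices, and builds the dict with a single comprehension over enumerate filtering on the digit character '1'; A instead runs a while-loop repeatedly isolating and clearing the lowest set bit with rem & -rem / bit_length / xor.
import Mathlib
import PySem

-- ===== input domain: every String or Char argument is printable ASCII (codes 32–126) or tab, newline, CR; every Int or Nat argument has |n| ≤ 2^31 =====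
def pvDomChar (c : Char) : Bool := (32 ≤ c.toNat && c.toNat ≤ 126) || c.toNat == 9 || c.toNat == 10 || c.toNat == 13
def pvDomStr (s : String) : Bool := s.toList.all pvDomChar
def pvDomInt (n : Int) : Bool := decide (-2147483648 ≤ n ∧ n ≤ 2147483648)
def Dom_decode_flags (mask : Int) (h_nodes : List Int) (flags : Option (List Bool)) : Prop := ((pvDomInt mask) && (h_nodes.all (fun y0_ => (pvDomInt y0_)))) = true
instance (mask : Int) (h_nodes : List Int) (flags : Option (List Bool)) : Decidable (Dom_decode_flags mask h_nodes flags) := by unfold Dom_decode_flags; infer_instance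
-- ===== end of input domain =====

-- B replaces A's lowest-set-bit isolation loop by rendering the mask as its binary digit string (bin), reversing it, and folding a dict comprehension over enumerate; return values proved equal wherever A returns.


-- ===== PORT A =====
-- A's while loop, one recursive step per iteration over the same state (rem, out).
-- The fuel argument only makes the recursion total: for mask ≥ 0 (inside Pre_) it never
-- runs out; Python diverges on negative mask with flags ≠ None (excluded by Pre_).
-- `lsb.bit_length() - 1` is ported as `lsb.natAbs.size - 1` (exact: Python bit_length = Nat.size of |n|).
-- An out-of-range index is an IndexError in Python (excluded by Pre_); the port stops and returns junk there.
def decodeLoopA (h_nodes : List Int) (fl : List Bool) : Nat → Int → PySem.Dict Int Bool → PySem.Dict Int Bool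
  | 0, _, out => out
  | fuel + 1, rem, out =>
    if rem = 0 then out
    else
      let lsb := Int.land rem (-rem)            -- lsb = rem & -rem
      let i := lsb.natAbs.size - 1              -- i = lsb.bit_length() - 1
      let rem' := Int.xor rem lsb               -- rem ^= lsb
      match PySem.List.pyGet? h_nodes (i : Int), PySem.List.pyGet? fl (i : Int) with
      | some h, some f => decodeLoopA h_nodes fl fuel rem' (out.insert h f)
      | _, _ => out

def decode_flags (mask : Int) (h_nodes : List Int) (flags : Option (List Bool)) : List (Int × Bool) :=
  match flags with
  | none => []
  | some fl => (decodeLoopA h_nodes fl (mask.natAbs + 1) mask PySem.Dict.empty).items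

-- ===== PORT B =====
-- `bin(mask)` is ported as pyBin: sign, then "0b", then the high-to-low binary digit string
-- (built as the reverse of the low-to-high digit list binRevDigits; bin(0) = "0b0").
def binRevDigits (n : Nat) : List Char :=
  if h : n = 0 then [] else (if n % 2 = 1 then '1' else '0') :: binRevDigits (n / 2)
decreasing_by exact Nat.div_lt_self (Nat.pos_of_ne_zero h) one_lt_two

def pyBin (n : Int) : List Char :=
  (if n < 0 then ['-'] else []) ++ '0' :: 'b' ::
    (if n = 0 then ['0'] else (binRevDigits n.natAbs).reverse)

-- the body of B's dict comprehension: keep (h_nodes[i], flags[i]) when the digit is '1'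
-- (an out-of-range index is an IndexError in Python, excluded by Pre_; the port keeps out unchanged there)
def stepB (h_nodes : List Int) (fl : List Bool) (out : PySem.Dict Int Bool) (p : Int × Char) : PySem.Dict Int Bool :=
  if p.2 = '1' then
    match PySem.List.pyGet? h_nodes p.1, PySem.List.pyGet? fl p.1 with
    | some h, some f => out.insert h f
    | _, _ => out
  else out

-- bin(mask)[2:] → slice, reversed(...) → .reverse, the comprehension → a fold of stepB over enumerate
def decode_flags_alt (mask : Int) (h_nodes : List Int) (flags : Option (List Bool)) : List (Int × Bool) :=
  match flags with
  | none => []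
  | some fl =>
    ((PySem.List.enumerate ((PySem.List.slice (pyBin mask) (some 2) none).reverse)).foldl
      (stepB h_nodes fl) PySem.Dict.empty).items

-- ===== PRECONDITION & SPEC =====
-- Pre_ excludes exactly the inputs on which A does not return: with flags ≠ None, A loops forever
-- on a negative mask and raises IndexError as soon as a set bit's index reaches past h_nodes or flags
-- (mask < 2^min(len h_nodes, len flags) ↔ every set bit is in range for both lists).
def Pre_decode_flags (mask : Int) (h_nodes : List Int) (flags : Option (List Bool)) : Prop :=
  flags = none ∨ (0 ≤ mask ∧ mask < 2 ^ min h_nodes.length ((flags.getD []).length))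
instance (mask : Int) (h_nodes : List Int) (flags : Option (List Bool)) : Decidable (Pre_decode_flags mask h_nodes flags) := by unfold Pre_decode_flags; infer_instance

def pvWitness_decode_flags : Int × List Int × Option (List Bool) := (3, [10, 20], some [true, false])

def Spec_decode_flags (mask : Int) (h_nodes : List Int) (flags : Option (List Bool)) (out : List (Int × Bool)) : Prop := out = decode_flags_alt mask h_nodes flags
instance (mask : Int) (h_nodes : List Int) (flags : Option (List Bool)) (out : List (Int × Bool)) : Decidable (Spec_decode_flags mask h_nodes flags out) := by unfold Spec_decode_flags; infer_instance

-- ===== CLAIM (what is proved, stated in full; the proofs are below) =====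
def Claim_equal_decode_flags : Prop := ∀ (mask : Int) (h_nodes : List Int) (flags : Option (List Bool)), Dom_decode_flags mask h_nodes flags → Pre_decode_flags mask h_nodes flags → Spec_decode_flags mask h_nodes flags (decode_flags mask h_nodes flags)

-- ===== LEMMAS AND PROOFS =====

-- index of the lowest set bit of a positive number
def lowBit (n : Nat) : Nat :=
  if _h : n = 0 ∨ n % 2 = 1 then 0 else lowBit (n / 2) + 1
decreasing_by exact Nat.div_lt_self (Nat.pos_of_ne_zero (by tauto)) one_lt_two

-- ascending list of set-bit indices of n
def bitsOf (n : Nat) : List Nat := (List.range n.size).filter (fun k => n.testBit k)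

-- the common fold both ports reduce to
def cfStep (h_nodes : List Int) (fl : List Bool) (out : PySem.Dict Int Bool) (i : Nat) : PySem.Dict Int Bool :=
  match PySem.List.pyGet? h_nodes (i : Int), PySem.List.pyGet? fl (i : Int) with
  | some h, some f => out.insert h f
  | _, _ => out

theorem lowBit_odd (n : Nat) (h : n % 2 = 1) : lowBit n = 0 := by
  rw [lowBit]; simp [h]

theorem lowBit_even (n : Nat) (h0 : n ≠ 0) (h : n % 2 = 0) : lowBit n = lowBit (n / 2) + 1 := by
  rw [lowBit]; simp [h0, h]

theorem testBit_lowBit (n : Nat) (h0 : n ≠ 0) : n.testBit (lowBit n) = true := by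
  induction n using lowBit.induct with
  | case1 n h =>
    rcases h with h | h
    · exact absurd h h0
    · rw [lowBit_odd n h, Nat.testBit_zero, h]; rfl
  | case2 n h ih =>
    push Not at h
    have hne : n ≠ 0 := h.1
    have he : n % 2 = 0 := by omega
    have h2 : n / 2 ≠ 0 := by omega
    rw [lowBit_even n hne he, Nat.testBit_add_one]
    exact ih h2

theorem testBit_below_lowBit (n : Nat) (k : Nat) (hk : k < lowBit n) : n.testBit k = false := by
  induction n using lowBit.induct generalizing k with
  | case1 n h =>
    have : lowBit n = 0 := by rw [lowBit]; simp [h]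
    omega
  | case2 n h ih =>
    push Not at h
    have hne : n ≠ 0 := h.1
    have he : n % 2 = 0 := by omega
    rw [lowBit_even n hne he] at hk
    cases k with
    | zero => rw [Nat.testBit_zero]; simp; omega
    | succ k => rw [Nat.testBit_add_one]; exact ih k (by omega)

theorem ldiff_self (m : Nat) : Nat.ldiff m m = 0 := by
  apply Nat.eq_of_testBit_eq
  intro i
  simp [Nat.testBit_ldiff]

theorem bit_true_eq (m : Nat) : Nat.bit true m = 2 * m + 1 := by simp [Nat.bit]

theorem bit_false_eq (m : Nat) : Nat.bit false m = 2 * m := by simp [Nat.bit]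

theorem ldiff_pred (n : Nat) (h0 : n ≠ 0) : Nat.ldiff n (n - 1) = 2 ^ lowBit n := by
  induction n using lowBit.induct with
  | case1 n h =>
    rcases h with h | h
    · exact absurd h h0
    · obtain ⟨m, rfl⟩ : ∃ m, n = 2 * m + 1 := ⟨n / 2, by omega⟩
      rw [lowBit_odd _ (by omega), pow_zero]
      rw [show 2 * m + 1 - 1 = Nat.bit false m from by rw [bit_false_eq]; omega]
      rw [show 2 * m + 1 = Nat.bit true m from by rw [bit_true_eq]]
      rw [Nat.ldiff_bit, ldiff_self]
      rfl
  | case2 n h ih =>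
    push Not at h
    obtain ⟨m, rfl⟩ : ∃ m, n = 2 * m := ⟨n / 2, by omega⟩
    have h2 : m ≠ 0 := by omega
    rw [lowBit_even _ (by omega) (by omega), show 2 * m / 2 = m from by omega]
    rw [show 2 * m - 1 = Nat.bit true (m - 1) from by rw [bit_true_eq]; omega]
    rw [show 2 * m = Nat.bit false m from by rw [bit_false_eq]]
    rw [Nat.ldiff_bit]
    rw [show 2 * m / 2 = m from by omega] at ih
    simp [ih h2]
    ring

theorem xor_lowBit (n : Nat) (h0 : n ≠ 0) : n ^^^ 2 ^ lowBit n = n - 2 ^ lowBit n := by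
  induction n using lowBit.induct with
  | case1 n h =>
    rcases h with h | h
    · exact absurd h h0
    · obtain ⟨m, rfl⟩ : ∃ m, n = 2 * m + 1 := ⟨n / 2, by omega⟩
      rw [lowBit_odd _ (by omega), pow_zero]
      rw [show 2 * m + 1 = Nat.bit true m from by rw [bit_true_eq]]
      rw [show (1 : Nat) = Nat.bit true 0 from rfl]
      rw [Nat.xor_bit]
      simp [Nat.bit]
  | case2 n h ih =>
    push Not at h
    obtain ⟨m, rfl⟩ : ∃ m, n = 2 * m := ⟨n / 2, by omega⟩
    have h2 : m ≠ 0 := by omega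
    rw [show 2 * m / 2 = m from by omega] at ih
    have hle := Nat.ge_two_pow_of_testBit (testBit_lowBit m h2)
    rw [lowBit_even _ (by omega) (by omega), show 2 * m / 2 = m from by omega]
    rw [show (2 : Nat) ^ (lowBit m + 1) = Nat.bit false (2 ^ lowBit m) from by rw [bit_false_eq]; ring]
    rw [show 2 * m = Nat.bit false m from by rw [bit_false_eq]]
    rw [Nat.xor_bit, ih h2]
    simp
    omega

theorem filter_range_of_size_le (x m : Nat) (hm : x.size ≤ m) :
    (List.range m).filter (fun k => x.testBit k) = bitsOf x := by
  obtain ⟨j, rfl⟩ : ∃ j, m = x.size + j := ⟨m - x.size, by omega⟩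
  induction j with
  | zero => rfl
  | succ j ih =>
    rw [show x.size + (j + 1) = (x.size + j) + 1 from rfl, List.range_succ, List.filter_append,
      ih (by omega)]
    have hf : x.testBit (x.size + j) = false :=
      Nat.testBit_lt_two_pow
        (lt_of_lt_of_le (Nat.lt_size_self x) (Nat.pow_le_pow_right (by norm_num) (by omega)))
    simp [hf]

theorem filter_range_cons (n : Nat) (h0 : n ≠ 0) (m : Nat) (hm : lowBit n < m) :
    (List.range m).filter (fun k => n.testBit k)
      = lowBit n :: (List.range m).filter (fun k => (n ^^^ 2 ^ lowBit n).testBit k) := by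
  have htb : ∀ k, (n ^^^ 2 ^ lowBit n).testBit k = (n.testBit k ^^ decide (lowBit n = k)) :=
    fun k => by rw [Nat.testBit_xor, Nat.testBit_two_pow]
  induction m with
  | zero => omega
  | succ m ih =>
    rw [List.range_succ, List.filter_append, List.filter_append]
    by_cases hlm : lowBit n < m
    · have he : (n ^^^ 2 ^ lowBit n).testBit m = n.testBit m := by
        rw [htb m, show decide (lowBit n = m) = false from by simp; omega]
        simp
      rw [ih hlm, List.cons_append]
      have hfil : List.filter (fun k => n.testBit k) [m]
          = List.filter (fun k => (n ^^^ 2 ^ lowBit n).testBit k) [m] := by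
        simp only [List.filter, he]
      rw [hfil]
    · have hlm' : lowBit n = m := by omega
      have hz : (List.range m).filter (fun k => n.testBit k) = [] := by
        apply List.filter_eq_nil_iff.mpr
        intro k hk
        simp [testBit_below_lowBit n k (by simp at hk; omega)]
      have hz' : (List.range m).filter (fun k => (n ^^^ 2 ^ lowBit n).testBit k) = [] := by
        apply List.filter_eq_nil_iff.mpr
        intro k hk
        simp only [htb k]
        rw [testBit_below_lowBit n k (by simp at hk; omega),
          show decide (lowBit n = k) = false from by simp at hk ⊢; omega]
        simp
      have ht : (n ^^^ 2 ^ lowBit n).testBit m = false := by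
        rw [htb m, ← hlm', testBit_lowBit n h0]
        simp
      rw [hz, hz']
      simp [← hlm', testBit_lowBit n h0]

theorem bitsOf_cons (n : Nat) (h0 : n ≠ 0) : bitsOf n = lowBit n :: bitsOf (n ^^^ 2 ^ lowBit n) := by
  have hl : lowBit n < n.size := Nat.lt_size.mpr (Nat.ge_two_pow_of_testBit (testBit_lowBit n h0))
  have hsz : (n ^^^ 2 ^ lowBit n).size ≤ n.size :=
    Nat.size_le_size (by rw [xor_lowBit n h0]; exact Nat.sub_le _ _)
  rw [bitsOf, filter_range_cons n h0 _ hl, filter_range_of_size_le _ _ hsz]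

theorem loopA_eq_fold (h_nodes : List Int) (fl : List Bool) (fuel n : Nat) (out : PySem.Dict Int Bool)
    (hfuel : n < fuel)
    (H : ∀ k, n.testBit k = true → k < h_nodes.length ∧ k < fl.length) :
    decodeLoopA h_nodes fl fuel (n : Int) out = (bitsOf n).foldl (cfStep h_nodes fl) out := by
  induction fuel generalizing n out with
  | zero => omega
  | succ fuel ih =>
    by_cases hn : n = 0
    · subst hn
      simp [decodeLoopA, bitsOf, Nat.size_zero]
    · have hnz : ((n : Int) ≠ 0) := by exact_mod_cast hn
      obtain ⟨m, hm⟩ : ∃ m, n = m + 1 := ⟨n - 1, by omega⟩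
      have hneg : -((n : Int)) = Int.negSucc m := by
        rw [Int.negSucc_eq, hm]; push_cast; ring
      have hland : Int.land ((n : Int)) (-((n : Int))) = ((2 ^ lowBit n : Nat) : Int) := by
        rw [hneg, ← ldiff_pred n hn, show n - 1 = m from by omega, hm]
        rfl
      have hxor : Int.xor ((n : Int)) ((2 ^ lowBit n : Nat) : Int)
          = ((n ^^^ 2 ^ lowBit n : Nat) : Int) := rfl
      have hidx : (((2 ^ lowBit n : Nat) : Int)).natAbs.size - 1 = lowBit n := by
        rw [Int.natAbs_natCast, Nat.size_pow]; omega
      have hrange := H (lowBit n) (testBit_lowBit n hn)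
      have hget1 : PySem.List.pyGet? h_nodes ((lowBit n : Nat) : Int) = some h_nodes[lowBit n] := by
        rw [PySem.List.pyGet?_natCast]
        exact List.getElem?_eq_getElem hrange.1
      have hget2 : PySem.List.pyGet? fl ((lowBit n : Nat) : Int) = some fl[lowBit n] := by
        rw [PySem.List.pyGet?_natCast]
        exact List.getElem?_eq_getElem hrange.2
      have hlt : n ^^^ 2 ^ lowBit n < fuel := by
        rw [xor_lowBit n hn]
        have := Nat.pow_pos (show 0 < 2 by norm_num) (n := lowBit n)
        omega
      have H' : ∀ k, (n ^^^ 2 ^ lowBit n).testBit k = true → k < h_nodes.length ∧ k < fl.length := by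
        intro k hk
        rw [Nat.testBit_xor, Nat.testBit_two_pow] at hk
        by_cases hlk : lowBit n = k
        · subst hlk; simp [testBit_lowBit n hn] at hk
        · simp [hlk] at hk
          exact H k hk
      rw [bitsOf_cons n hn, List.foldl_cons]
      simp only [decodeLoopA, if_neg hnz, hland, hidx, hxor, hget1, hget2]
      rw [ih (n ^^^ 2 ^ lowBit n) _ hlt H']
      simp [cfStep, hget1, hget2]

-- B-side: n.size ≤ (n/2).size + 1 (so bitsOf n may be read off a range of that length)
theorem size_le_half_succ (n : Nat) : n.size ≤ (n / 2).size + 1 := by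
  rw [Nat.size_le]
  have h1 : n / 2 < 2 ^ (n / 2).size := Nat.lt_size_self (n / 2)
  have h2 : 2 ^ ((n / 2).size + 1) = 2 * 2 ^ (n / 2).size := by ring
  omega

-- B-side: peel the lowest bit off bitsOf
theorem bitsOf_rec (n : Nat) :
    bitsOf n = (if n % 2 = 1 then [0] else []) ++ (bitsOf (n / 2)).map (· + 1) := by
  rw [← filter_range_of_size_le n ((n / 2).size + 1) (size_le_half_succ n)]
  rw [List.range_succ_eq_map, List.filter_cons]
  have hmap : (List.filter (fun k => n.testBit k) (List.map Nat.succ (List.range (n / 2).size)))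
      = ((List.range (n / 2).size).filter (fun k => (n / 2).testBit k)).map Nat.succ := by
    rw [List.filter_map]
    congr 1
    apply List.filter_congr
    intro k _
    simp [Function.comp, Nat.testBit_add_one]
  rw [hmap]
  have hsucc : ((List.range (n / 2).size).filter (fun k => (n / 2).testBit k)).map Nat.succ
      = (bitsOf (n / 2)).map (· + 1) := by
    rw [bitsOf]
  rw [hsucc]
  by_cases hodd : n % 2 = 1
  · rw [if_pos hodd, show Nat.testBit n 0 = true from by rw [Nat.testBit_zero]; simp [hodd]]
    simp
  · rw [if_neg hodd, show Nat.testBit n 0 = false from by rw [Nat.testBit_zero]; simp [hodd]]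
    simp

-- B's fold over the enumerated reversed digit string is the common fold, with indices shifted by s
theorem foldB_enum (h_nodes : List Int) (fl : List Bool) (n : Nat) :
    ∀ (s : Nat) (out : PySem.Dict Int Bool),
    (PySem.List.enumerate (binRevDigits n) (s : Int)).foldl (stepB h_nodes fl) out
      = ((bitsOf n).map (· + s)).foldl (cfStep h_nodes fl) out := by
  induction n using binRevDigits.induct with
  | case1 =>
    intro s out
    simp [binRevDigits, bitsOf, Nat.size_zero, PySem.List.enumerate_nil]
  | case2 n h ih =>
    intro s out
    rw [show binRevDigits n = (if n % 2 = 1 then '1' else '0') :: binRevDigits (n / 2) from by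
      rw [binRevDigits]; simp [h]]
    rw [PySem.List.enumerate_cons, List.foldl_cons, bitsOf_rec n]
    have hcast : ((s : Int) + 1) = (((s + 1 : Nat)) : Int) := by push_cast; ring
    have hmap : ((bitsOf (n / 2)).map (· + 1)).map (· + s)
        = (bitsOf (n / 2)).map (· + (s + 1)) := by
      rw [List.map_map]
      apply List.map_congr_left
      intro k _
      simp [Function.comp]; omega
    by_cases hodd : n % 2 = 1
    · rw [if_pos hodd, if_pos hodd]
      have hstep : stepB h_nodes fl out ((s : Int), '1') = cfStep h_nodes fl out s := by
        simp [stepB, cfStep]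
      rw [hstep, hcast, ih (s + 1) (cfStep h_nodes fl out s)]
      simp only [List.map_append, List.map_cons, List.map_nil, hmap]
      simp
    · rw [if_neg hodd, if_neg hodd]
      have hstep : stepB h_nodes fl out ((s : Int), '0') = out := by
        simp [stepB]
      rw [hstep, hcast, ih (s + 1) out]
      simp only [List.nil_append, hmap]

-- the sliced, reversed bin string of a positive n is exactly the low-to-high digit list
theorem slice_pyBin (n : Nat) (h0 : n ≠ 0) :
    (PySem.List.slice (pyBin (n : Int)) (some 2) none).reverse = binRevDigits n := by
  have h1 : ¬ ((n : Int) < 0) := by omega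
  have h2 : ¬ ((n : Int) = 0) := by exact_mod_cast h0
  rw [pyBin]
  simp only [if_neg h1, if_neg h2, List.nil_append]
  rw [PySem.List.slice_from _ (by norm_num : (0 : Int) ≤ 2)]
  simp [Int.natAbs_natCast]

-- ===== VERDICT (by name: the statement is the Claim_ definition above) =====
theorem decode_flags_spec : Claim_equal_decode_flags := by
  intro mask h_nodes flags _hdom hpre
  unfold Spec_decode_flags
  cases flags with
  | none => rfl
  | some fl =>
    rcases hpre with h | ⟨h0, hlt⟩
    · exact absurd h (by simp)
    · obtain ⟨n, rfl⟩ : ∃ n : Nat, mask = (n : Int) := ⟨mask.toNat, (Int.toNat_of_nonneg h0).symm⟩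
      have hlt' : n < 2 ^ min h_nodes.length fl.length := by
        simp only [Option.getD_some] at hlt
        exact_mod_cast hlt
      have H : ∀ k, n.testBit k = true → k < h_nodes.length ∧ k < fl.length := by
        intro k hk
        have h2 : 2 ^ k ≤ n := Nat.ge_two_pow_of_testBit hk
        have hmin : k < min h_nodes.length fl.length := by
          by_contra hc
          push Not at hc
          have := Nat.pow_le_pow_right (show 0 < 2 by norm_num) hc
          omega
        omega
      by_cases hn : n = 0
      · subst hn
        simp only [decode_flags, decode_flags_alt, Nat.cast_zero]
        rfl
      · simp only [decode_flags, decode_flags_alt, Int.natAbs_natCast]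
        rw [slice_pyBin n hn]
        rw [show (PySem.List.enumerate (binRevDigits n) : List (Int × Char))
            = PySem.List.enumerate (binRevDigits n) ((0 : Nat) : Int) from by norm_num]
        rw [foldB_enum h_nodes fl n 0 PySem.Dict.empty]
        rw [loopA_eq_fold _ _ _ _ _ (by omega) H]
        simp
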